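-- pv_equiv track=rewrite | github.com/xiasma/evagene2.0 | api/evagene/gedcom.py | _group_level0
-- ===== SOURCE A (Python) =====
-- def _group_level0(lines: list[tuple[int, str, str, str]]) -> list[list[tuple[int, str, str, str]]]:
--     """Group parsed lines into level-0 records."""
--     groups: list[list[tuple[int, str, str, str]]] = []
--     current: list[tuple[int, str, str, str]] = []
--     for item in lines:
--         if item[0] == 0:
--             if current:
--                 groups.append(current)
--             current = [item]
--         else:
--             current.append(item)
--     if current:
--         groups.append(current)
--     return groups
-- ===== SOURCE B (Python) =====
-- def _group_level0(lines: list[tuple[int, str, str, str]]) -> list[list[tuple[int, str, str, str]]]: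
--     """Group parsed lines into level-0 records (record = a line plus the non-zero lines after it)."""
--     if not lines:
--         return []
--     k = 1
--     while k < len(lines) and lines[k][0] != 0:
--         k += 1
--     return [lines[:k]] + _group_level0(lines[k:])
-- ===== Notes on version B (the rewrite author's own statement) =====
-- stated objective: simpler
-- what changed: Replaced the single-pass groups/current accumulator loop (with its trailing flush) by a recursion that spans each record directly: scan to the next level-0 boundary, slice lines[:k] off as one group, recurse on lines[k:].
import Mathlib
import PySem

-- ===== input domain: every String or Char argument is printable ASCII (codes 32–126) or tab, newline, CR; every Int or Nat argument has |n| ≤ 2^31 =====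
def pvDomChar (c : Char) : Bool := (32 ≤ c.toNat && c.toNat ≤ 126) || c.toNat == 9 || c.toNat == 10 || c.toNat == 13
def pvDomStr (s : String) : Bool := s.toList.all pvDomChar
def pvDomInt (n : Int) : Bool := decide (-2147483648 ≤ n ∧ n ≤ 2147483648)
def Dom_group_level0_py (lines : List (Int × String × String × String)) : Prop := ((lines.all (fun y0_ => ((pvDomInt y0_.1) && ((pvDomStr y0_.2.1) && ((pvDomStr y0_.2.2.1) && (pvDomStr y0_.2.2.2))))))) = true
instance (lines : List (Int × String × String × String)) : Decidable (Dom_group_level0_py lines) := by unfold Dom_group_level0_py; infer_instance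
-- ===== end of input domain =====

-- B replaces A's groups/current accumulator loop by a direct recursion slicing one record at a time (objective: simpler).
-- ===== PORT A =====
-- step of A's for-loop over state (groups, current)
def groupStepA (st : List (List (Int × String × String × String)) × List (Int × String × String × String))
    (item : Int × String × String × String) :
    List (List (Int × String × String × String)) × List (Int × String × String × String) :=
  if item.1 == 0 then
    ((if st.2 ≠ [] then st.1 ++ [st.2] else st.1), [item])
  else
    (st.1, st.2 ++ [item])

-- final flush: 'if current: groups.append(current)'
def finishA (st : List (List (Int × String × String × String)) × List (Int × String × String × String)) :
    List (List (Int × String × String × String)) :=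
  if st.2 ≠ [] then st.1 ++ [st.2] else st.1

def group_level0_py (lines : List (Int × String × String × String)) : List (List (Int × String × String × String)) :=
  finishA (lines.foldl groupStepA ([], []))

-- ===== PORT B =====
-- Source B: k scans past the non-level-0 lines after the head, so lines[:k] = head :: takeWhile (level ≠ 0)
-- of the tail and lines[k:] = dropWhile (level ≠ 0) of the tail; recurse on the remainder.
def group_level0_py_alt (lines : List (Int × String × String × String)) : List (List (Int × String × String × String)) :=
  match lines with
  | [] => []
  | x :: t =>
      (x :: t.takeWhile (fun y => y.1 ≠ 0)) :: group_level0_py_alt (t.dropWhile (fun y => y.1 ≠ 0))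
termination_by lines.length
decreasing_by
  simp only [List.length_cons]
  exact Nat.lt_succ_of_le (List.length_dropWhile_le _ _)

-- ===== PRECONDITION & SPEC =====
def Spec_group_level0_py (lines : List (Int × String × String × String)) (out : List (List (Int × String × String × String))) : Prop := out = group_level0_py_alt lines
instance (lines : List (Int × String × String × String)) (out : List (List (Int × String × String × String))) : Decidable (Spec_group_level0_py lines out) := by unfold Spec_group_level0_py; infer_instance

-- ===== CLAIM (what is proved, stated in full; the proofs are below) =====
def Claim_equal_group_level0_py : Prop := ∀ (lines : List (Int × String × String × String)), Dom_group_level0_py lines → Spec_group_level0_py lines (group_level0_py lines)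

-- ===== LEMMAS AND PROOFS =====

-- continuation of A's loop from a non-empty current buffer, with the final flush applied
def goA (cur : List (Int × String × String × String)) :
    List (Int × String × String × String) → List (List (Int × String × String × String))
  | [] => [cur]
  | x :: t => if x.1 == 0 then cur :: goA [x] t else goA (cur ++ [x]) t

theorem goA_foldl (lines : List (Int × String × String × String)) :
    ∀ (gs : List (List (Int × String × String × String)))
      (cur : List (Int × String × String × String)), cur ≠ [] →
      finishA (lines.foldl groupStepA (gs, cur)) = gs ++ goA cur lines := by
  induction lines with
  | nil => intro gs cur h; simp [finishA, goA, h]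
  | cons x t ih =>
      intro gs cur h
      by_cases hx : (x.1 == 0) = true
      · rw [List.foldl_cons,
          show groupStepA (gs, cur) x = (gs ++ [cur], [x]) by simp [groupStepA, hx, h],
          ih (gs ++ [cur]) [x] (by simp)]
        simp [goA, hx]
      · rw [List.foldl_cons,
          show groupStepA (gs, cur) x = (gs, cur ++ [x]) by simp [groupStepA, hx],
          ih gs (cur ++ [x]) (by simp)]
        simp [goA, hx]

theorem goA_alt (lines : List (Int × String × String × String)) :
    ∀ (cur : List (Int × String × String × String)),
      goA cur lines =
        (cur ++ lines.takeWhile (fun y => y.1 ≠ 0)) ::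
          group_level0_py_alt (lines.dropWhile (fun y => y.1 ≠ 0)) := by
  induction lines with
  | nil => intro cur; simp [goA, group_level0_py_alt]
  | cons x t ih =>
      intro cur
      by_cases hx : x.1 = 0
      · rw [show goA cur (x :: t) = cur :: goA [x] t by simp [goA, hx],
          ih [x]]
        simp [group_level0_py_alt, hx]
      · rw [show goA cur (x :: t) = goA (cur ++ [x]) t by simp [goA, hx],
          ih (cur ++ [x])]
        simp [hx]

-- ===== VERDICT (by name: the statement is the Claim_ definition above) =====
theorem group_level0_py_spec : Claim_equal_group_level0_py := by
  intro lines _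
  unfold Spec_group_level0_py group_level0_py
  cases lines with
  | nil => simp [finishA, group_level0_py_alt]
  | cons x t =>
      rw [List.foldl_cons,
        show groupStepA ([], []) x = ([], [x]) by
          by_cases hx : (x.1 == 0) = true <;> simp [groupStepA, hx],
        goA_foldl t [] [x] (by simp), goA_alt]
      simp [group_level0_py_alt]
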